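-- pv_equiv track=rewrite | github.com/elroi773/Coding-Test | 프로그래머스/3/214288. 상담원 인원/상담원 인원.py | calc_wait
-- ===== SOURCE A (Python) =====
-- import heapq
--
-- def calc_wait(req_list, m):
--     """req_list: [(start, duration), ...] sorted by start"""
--     if not req_list:
--         return 0
--
--     heap = []  # end times of ongoing consultations
--     total_wait = 0
--
--     for a, b in req_list:
--         if len(heap) < m:
--             # free mentor available
--             heapq.heappush(heap, a + b)
--         else:
--             earliest_end = heapq.heappop(heap)
--             start_time = max(a, earliest_end)
--             total_wait += start_time - a
--             heapq.heappush(heap, start_time + b)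
--
--     return total_wait
-- ===== SOURCE B (Python) =====
-- def calc_wait(req_list, m):
--     """req_list: [(start, duration), ...] sorted by start"""
--     total = 0
--     ends = []  # end times of ongoing consultations, unordered
--     for a, b in req_list:
--         if len(ends) < m:
--             ends.append(a + b)
--         else:
--             i = min(range(len(ends)), key=ends.__getitem__)
--             start = max(a, ends[i])
--             total += start - a
--             ends[i] = start + b
--     return total
-- ===== Notes on version B (the rewrite author's own statement) =====
-- stated objective: alternative
-- what changed: replaces the binary heap of end times by a plain unordered list whose minimum is found by a linear scan and overwritten in place (no heap order ever maintained, no pop/push pair)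
import Mathlib
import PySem

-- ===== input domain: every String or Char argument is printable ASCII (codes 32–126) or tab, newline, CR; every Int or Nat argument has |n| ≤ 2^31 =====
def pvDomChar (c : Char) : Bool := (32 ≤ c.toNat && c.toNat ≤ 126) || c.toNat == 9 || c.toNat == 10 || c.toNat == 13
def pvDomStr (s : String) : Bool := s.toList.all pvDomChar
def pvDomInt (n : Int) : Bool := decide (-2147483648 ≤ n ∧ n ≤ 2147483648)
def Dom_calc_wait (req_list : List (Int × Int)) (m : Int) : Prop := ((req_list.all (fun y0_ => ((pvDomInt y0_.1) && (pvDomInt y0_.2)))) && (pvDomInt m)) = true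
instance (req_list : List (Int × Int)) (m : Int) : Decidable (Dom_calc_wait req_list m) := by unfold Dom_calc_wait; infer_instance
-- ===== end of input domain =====

-- B replaces A's binary heap of end times by a plain unordered list with a linear
-- min-scan and in-place overwrite (alternative data structure; not claimed faster).

-- ===== PORT A =====
-- heapq is not covered by PySem, so heappush/heappop are ported by hand, exactly
-- following CPython's heapq (_siftdown / _siftup).  hget is list indexing; it is
-- exact on the in-range indices these operations actually use.
def hget (h : List Int) (i : Nat) : Int := h.getD i 0

-- CPython _siftdown(heap, 0, pos) with newitem = x already conceptually at pos
def siftdownA (h : List Int) (x : Int) (pos : Nat) : List Int :=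
  if pos = 0 then h.set 0 x
  else if x < hget h ((pos - 1) / 2) then
    siftdownA (h.set pos (hget h ((pos - 1) / 2))) x ((pos - 1) / 2)
  else h.set pos x
termination_by pos
decreasing_by omega

-- CPython _siftup(heap, pos) with newitem = x
def siftupA (h : List Int) (x : Int) (pos : Nat) : List Int :=
  if hc : 2 * pos + 1 < h.length then
    if 2 * pos + 2 < h.length ∧ ¬ (hget h (2 * pos + 1) < hget h (2 * pos + 2)) then
      siftupA (h.set pos (hget h (2 * pos + 2))) x (2 * pos + 2)
    else
      siftupA (h.set pos (hget h (2 * pos + 1))) x (2 * pos + 1)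
  else siftdownA h x pos
termination_by h.length - pos
decreasing_by
  all_goals simp only [List.length_set]
  all_goals omega

def heappushA (h : List Int) (x : Int) : List Int := siftdownA (h ++ [x]) x h.length

-- CPython heappop: lastelt = heap.pop(); if heap: swap into root and sift up
def heappopA (h : List Int) : Int × List Int :=
  if h.dropLast.isEmpty then (hget h (h.length - 1), h.dropLast)
  else (hget h.dropLast 0,
        siftupA (h.dropLast.set 0 (hget h (h.length - 1))) (hget h (h.length - 1)) 0)

def calcStepA (m : Int) (s : List Int × Int) (ab : Int × Int) : List Int × Int :=
  if (s.1.length : Int) < m then (heappushA s.1 (ab.1 + ab.2), s.2)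
  else
    let p := heappopA s.1
    let start := max ab.1 p.1
    (heappushA p.2 (start + ab.2), s.2 + (start - ab.1))

def calc_wait (req_list : List (Int × Int)) (m : Int) : Int :=
  if req_list.isEmpty then 0
  else (req_list.foldl (calcStepA m) ([], 0)).2

-- ===== PORT B =====
-- min(range(len(ends)), key=ends.__getitem__): linear scan keeping the first
-- index whose value is strictly smaller than the best so far.
def minIdx (ends : List Int) : Nat :=
  (List.range ends.length).foldl (fun best j => if hget ends j < hget ends best then j else best) 0

def calcStepB (m : Int) (s : List Int × Int) (ab : Int × Int) : List Int × Int :=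
  if (s.1.length : Int) < m then (s.1 ++ [ab.1 + ab.2], s.2)
  else
    let i := minIdx s.1
    let start := max ab.1 (hget s.1 i)
    (s.1.set i (start + ab.2), s.2 + (start - ab.1))

def calc_wait_alt (req_list : List (Int × Int)) (m : Int) : Int :=
  (req_list.foldl (calcStepB m) ([], 0)).2

-- ===== PRECONDITION & SPEC =====
-- Pre_ excludes only the inputs on which A raises: with a nonempty request list
-- and m ≤ 0 the heap stays empty, so heappop raises IndexError (B raises ValueError there).
def Pre_calc_wait (req_list : List (Int × Int)) (m : Int) : Prop :=
  req_list = [] ∨ 1 ≤ m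
instance (req_list : List (Int × Int)) (m : Int) : Decidable (Pre_calc_wait req_list m) := by unfold Pre_calc_wait; infer_instance
def pvWitness_calc_wait : (List (Int × Int)) × Int := ([(0, 5), (1, 2), (3, 3)], 1)

def Spec_calc_wait (req_list : List (Int × Int)) (m : Int) (out : Int) : Prop := out = calc_wait_alt req_list m
instance (req_list : List (Int × Int)) (m : Int) (out : Int) : Decidable (Spec_calc_wait req_list m out) := by unfold Spec_calc_wait; infer_instance

-- ===== CLAIM (what is proved, stated in full; the proofs are below) =====
def Claim_equal_calc_wait : Prop := ∀ (req_list : List (Int × Int)) (m : Int), Dom_calc_wait req_list m → Pre_calc_wait req_list m → Spec_calc_wait req_list m (calc_wait req_list m)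

-- ===== LEMMAS AND PROOFS =====

-- parent index in the implicit binary-tree layout of the heap
def par (c : Nat) : Nat := (c - 1) / 2

theorem par_lt {c : Nat} (hc : 1 ≤ c) : par c < c := by unfold par; omega

def IsHeap (h : List Int) : Prop :=
  ∀ c, 1 ≤ c → c < h.length → hget h (par c) ≤ hget h c

-- heap property away from the "hole" pos, plus: children of the hole dominate the hole's parent
def HoleInv (h : List Int) (pos : Nat) : Prop :=
  (∀ c, 1 ≤ c → c < h.length → c ≠ pos → par c ≠ pos → hget h (par c) ≤ hget h c) ∧
  (∀ c, 1 ≤ c → c < h.length → par c = pos → 1 ≤ pos → hget h (par pos) ≤ hget h c)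

def SiftInv (h : List Int) (x : Int) (pos : Nat) : Prop :=
  HoleInv h pos ∧ ∀ c, 1 ≤ c → c < h.length → par c = pos → x ≤ hget h c

theorem hget_set : ∀ (l : List Int) (i : Nat) (a : Int) (j : Nat),
    hget (l.set i a) j = if i = j ∧ j < l.length then a else hget l j
  | [], i, a, j => by simp [hget]
  | b :: l, 0, a, 0 => by simp [hget]
  | b :: l, 0, a, j+1 => by simp [hget]
  | b :: l, i+1, a, 0 => by simp [hget]
  | b :: l, i+1, a, j+1 => by
      have ih := hget_set l i a j
      simp only [List.set_cons_succ, hget, List.getD_cons_succ, List.length_cons] at ih ⊢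
      rw [ih]
      split_ifs with h1 h2 <;> first | rfl | omega

theorem hget_set_ne (l : List Int) (i : Nat) (a : Int) (j : Nat) (hne : i ≠ j) :
    hget (l.set i a) j = hget l j := by
  rw [hget_set]; simp [hne]

theorem hget_set_self (l : List Int) (i : Nat) (a : Int) (hi : i < l.length) :
    hget (l.set i a) i = a := by
  rw [hget_set]; simp [hi]

theorem count_set : ∀ (l : List Int) (i : Nat), i < l.length → ∀ (a y : Int),
    (l.set i a).count y + (if hget l i = y then 1 else 0)
      = l.count y + (if a = y then 1 else 0)
  | [], i, hi => by simp at hi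
  | b :: l, 0, _ => by
      intro a y
      simp only [List.set_cons_zero, List.count_cons, hget, List.getD_cons_zero, beq_iff_eq]
      split_ifs <;> omega
  | b :: l, i+1, hi => by
      intro a y
      have ih := count_set l i (by simp at hi; omega) a y
      simp only [List.set_cons_succ, List.count_cons, hget, List.getD_cons_succ, beq_iff_eq] at ih ⊢
      split_ifs at ih ⊢ <;> omega

theorem count_singleton' (x y : Int) : List.count y [x] = if x = y then 1 else 0 := by
  rcases eq_or_ne x y with h | h
  · simp [h]
  · simp [h]

theorem count_set_set (h : List Int) (i j : Nat) (x : Int)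
    (hi : i < h.length) (hj : j < h.length) (hne : i ≠ j) (y : Int) :
    ((h.set i (hget h j)).set j x).count y = (h.set i x).count y := by
  have c1 := count_set h i hi (hget h j) y
  have c2 := count_set (h.set i (hget h j)) j (by simp [List.length_set]; omega) x y
  have c3 := count_set h i hi x y
  rw [hget_set_ne _ _ _ _ hne] at c2
  split_ifs at c1 c2 c3 <;> omega

theorem hget_mem (h : List Int) (c : Nat) (hc : c < h.length) : hget h c ∈ h := by
  rw [hget, List.getD_eq_getElem _ _ hc]
  exact List.getElem_mem hc

theorem mem_hget (h : List Int) (y : Int) (hy : y ∈ h) :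
    ∃ c, c < h.length ∧ hget h c = y := by
  obtain ⟨n, hn, e⟩ := List.mem_iff_getElem.mp hy
  exact ⟨n, hn, by rw [hget, List.getD_eq_getElem _ _ hn]; exact e⟩

theorem hget_append_left : ∀ (h l : List Int) (i : Nat), i < h.length →
    hget (h ++ l) i = hget h i
  | [], _, i, hi => by simp at hi
  | b :: h, l, 0, _ => by simp [hget]
  | b :: h, l, i+1, hi => by
      simp only [List.cons_append, hget, List.getD_cons_succ]
      exact hget_append_left h l i (by simp at hi; omega)

theorem hget_append_self : ∀ (h : List Int) (x : Int), hget (h ++ [x]) h.length = x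
  | [], x => by simp [hget]
  | b :: h, x => by
      simp only [List.cons_append, hget, List.length_cons, List.getD_cons_succ]
      exact hget_append_self h x

theorem hget_dropLast : ∀ (h : List Int) (i : Nat), i < h.length - 1 →
    hget h.dropLast i = hget h i
  | [], i, hi => by simp at hi
  | [a], i, hi => by simp at hi
  | a :: b :: t, 0, _ => by simp [hget]
  | a :: b :: t, i+1, hi => by
      have ih := hget_dropLast (b :: t) i (by simp at hi ⊢; omega)
      simpa [hget, List.getD_cons_succ] using ih

theorem siftdownA_heap (h : List Int) (x : Int) (pos : Nat) :
    pos < h.length → SiftInv h x pos → IsHeap (siftdownA h x pos) := by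
  induction h, pos using siftdownA.induct x with
  | case1 h =>
    intro hp inv
    obtain ⟨⟨inv1, inv2⟩, inv3⟩ := inv
    rw [siftdownA]; simp only [if_true]
    intro c hc hlen
    rw [List.length_set] at hlen
    by_cases hpc : par c = 0
    · rw [hpc, hget_set_self _ _ _ hp, hget_set_ne _ _ _ _ (by omega)]
      exact inv3 c hc hlen hpc
    · rw [hget_set_ne _ _ _ _ (by omega), hget_set_ne _ _ _ _ (by omega)]
      exact inv1 c hc hlen (by omega) hpc
  | case2 h pos h0 hlt ih =>
    intro hp inv
    obtain ⟨⟨inv1, inv2⟩, inv3⟩ := inv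
    rw [siftdownA, if_neg h0, if_pos hlt]
    have hplt : (pos - 1) / 2 < pos := by omega
    have hparpos : par pos = (pos - 1) / 2 := rfl
    apply ih
    · rw [List.length_set]; omega
    · refine ⟨⟨?_, ?_⟩, ?_⟩
      · intro c hc hclen hcp hparcp
        rw [List.length_set] at hclen
        by_cases hcpos : c = pos
        · exact absurd (by rw [hcpos, hparpos]) hparcp
        · by_cases hpc2 : par c = pos
          · rw [hpc2, hget_set_self _ _ _ hp, hget_set_ne _ _ _ _ (fun e => hcpos e.symm)]
            have h2 := inv2 c hc hclen hpc2 (by omega)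
            rwa [hparpos] at h2
          · rw [hget_set_ne _ _ _ _ (fun e => hpc2 e.symm),
                hget_set_ne _ _ _ _ (fun e => hcpos e.symm)]
            exact inv1 c hc hclen hcpos hpc2
      · intro c hc hclen hparc hppos
        rw [List.length_set] at hclen
        have hpp : par ((pos - 1) / 2) < (pos - 1) / 2 := par_lt hppos
        rw [hget_set_ne _ _ _ _ (by omega)]
        by_cases hcpos : c = pos
        · rw [hcpos, hget_set_self _ _ _ hp]
          exact inv1 ((pos - 1) / 2) hppos (by omega) (by omega) (by omega)
        · rw [hget_set_ne _ _ _ _ (fun e => hcpos e.symm)]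
          have e1 : hget h (par ((pos - 1) / 2)) ≤ hget h ((pos - 1) / 2) :=
            inv1 ((pos - 1) / 2) hppos (by omega) (by omega) (by omega)
          have e2 : hget h (par c) ≤ hget h c :=
            inv1 c hc hclen hcpos (by rw [hparc]; omega)
          rw [hparc] at e2
          exact le_trans e1 e2
      · intro c hc hclen hparc
        rw [List.length_set] at hclen
        by_cases hcpos : c = pos
        · rw [hcpos, hget_set_self _ _ _ hp]
          exact le_of_lt hlt
        · rw [hget_set_ne _ _ _ _ (fun e => hcpos e.symm)]
          have e2 : hget h (par c) ≤ hget h c :=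
            inv1 c hc hclen hcpos (by rw [hparc]; omega)
          rw [hparc] at e2
          exact le_trans (le_of_lt hlt) e2
  | case3 h pos h0 hlt =>
    intro hp inv
    obtain ⟨⟨inv1, inv2⟩, inv3⟩ := inv
    rw [siftdownA, if_neg h0, if_neg hlt]
    intro c hc hclen
    rw [List.length_set] at hclen
    by_cases hcpos : c = pos
    · have hpp : par pos < pos := par_lt (by omega)
      rw [hcpos, hget_set_self _ _ _ hp, hget_set_ne _ _ _ _ (by omega)]
      exact not_lt.mp hlt
    · by_cases hpc : par c = pos
      · rw [hpc, hget_set_self _ _ _ hp, hget_set_ne _ _ _ _ (fun e => hcpos e.symm)]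
        exact inv3 c hc hclen hpc
      · rw [hget_set_ne _ _ _ _ (fun e => hpc e.symm),
            hget_set_ne _ _ _ _ (fun e => hcpos e.symm)]
        exact inv1 c hc hclen hcpos hpc

theorem siftdownA_count (h : List Int) (x : Int) (pos : Nat) :
    pos < h.length → ∀ y, (siftdownA h x pos).count y = ((h.set pos x).count y) := by
  induction h, pos using siftdownA.induct x with
  | case1 h =>
    intro hp y
    rw [siftdownA]; simp
  | case2 h pos h0 hlt ih =>
    intro hp y
    rw [siftdownA, if_neg h0, if_pos hlt]
    rw [ih (by rw [List.length_set]; omega) y]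
    exact count_set_set h pos ((pos - 1) / 2) x hp (by omega) (by omega) y
  | case3 h pos h0 hlt =>
    intro hp y
    rw [siftdownA, if_neg h0, if_neg hlt]

-- one descent step of _siftup preserves the hole invariant
theorem holeinv_step (h : List Int) (pos c : Nat) (hp : pos < h.length) (hc : c < h.length)
    (hposc : pos < c) (hpar : par c = pos)
    (hmin : ∀ d, 1 ≤ d → d < h.length → par d = pos → hget h c ≤ hget h d)
    (inv : HoleInv h pos) : HoleInv (h.set pos (hget h c)) c := by
  obtain ⟨inv1, inv2⟩ := inv
  constructor
  · intro d hd hdlen hdc hpardc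
    rw [List.length_set] at hdlen
    by_cases hdpos : d = pos
    · have hpp : par pos < pos := par_lt (by omega)
      rw [hdpos, hget_set_self _ _ _ hp, hget_set_ne _ _ _ _ (by omega)]
      exact inv2 c (by omega) hc hpar (by omega)
    · by_cases hpardpos : par d = pos
      · rw [hpardpos, hget_set_self _ _ _ hp, hget_set_ne _ _ _ _ (fun e => hdpos e.symm)]
        exact hmin d hd hdlen hpardpos
      · rw [hget_set_ne _ _ _ _ (fun e => hpardpos e.symm),
            hget_set_ne _ _ _ _ (fun e => hdpos e.symm)]
        exact inv1 d hd hdlen hdpos hpardpos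
  · intro d hd hdlen hpard hc1
    rw [List.length_set] at hdlen
    have hdgt : c < d := by have := par_lt hd; omega
    rw [hpar, hget_set_self _ _ _ hp, hget_set_ne _ _ _ _ (by omega)]
    have h5 : hget h (par d) ≤ hget h d := inv1 d hd hdlen (by omega) (by rw [hpard]; omega)
    rwa [hpard] at h5

theorem siftupA_heap (h : List Int) (x : Int) (pos : Nat) :
    pos < h.length → HoleInv h pos → IsHeap (siftupA h x pos) := by
  induction h, pos using siftupA.induct with
  | case1 h pos hc hcond ih =>
    intro hp inv
    rw [siftupA, dif_pos hc, if_pos hcond]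
    apply ih
    · rw [List.length_set]; exact hcond.1
    · apply holeinv_step h pos (2 * pos + 2) hp hcond.1 (by omega) (by unfold par; omega) ?_ inv
      intro d hd hdlen hpard
      have hd12 : d = 2 * pos + 1 ∨ d = 2 * pos + 2 := by unfold par at hpard; omega
      rcases hd12 with rfl | rfl
      · exact not_lt.mp hcond.2
      · exact le_refl _
  | case2 h pos hc hcond ih =>
    intro hp inv
    rw [siftupA, dif_pos hc, if_neg hcond]
    apply ih
    · rw [List.length_set]; exact hc
    · apply holeinv_step h pos (2 * pos + 1) hp hc (by omega) (by unfold par; omega) ?_ inv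
      intro d hd hdlen hpard
      have hd12 : d = 2 * pos + 1 ∨ d = 2 * pos + 2 := by unfold par at hpard; omega
      rcases hd12 with rfl | rfl
      · exact le_refl _
      · have hlt : hget h (2 * pos + 1) < hget h (2 * pos + 2) := by
          by_contra hno
          exact hcond ⟨hdlen, hno⟩
        exact le_of_lt hlt
  | case3 h pos hc =>
    intro hp inv
    rw [siftupA, dif_neg hc]
    apply siftdownA_heap h x pos hp
    refine ⟨inv, ?_⟩
    intro c hc1 hclen hparc
    exfalso; unfold par at hparc; omega

theorem siftupA_count (h : List Int) (x : Int) (pos : Nat) :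
    pos < h.length → ∀ y, (siftupA h x pos).count y = ((h.set pos x).count y) := by
  induction h, pos using siftupA.induct with
  | case1 h pos hc hcond ih =>
    intro hp y
    rw [siftupA, dif_pos hc, if_pos hcond]
    rw [ih (by rw [List.length_set]; exact hcond.1) y]
    exact count_set_set h pos (2 * pos + 2) x hp hcond.1 (by omega) y
  | case2 h pos hc hcond ih =>
    intro hp y
    rw [siftupA, dif_pos hc, if_neg hcond]
    rw [ih (by rw [List.length_set]; exact hc) y]
    exact count_set_set h pos (2 * pos + 1) x hp hc (by omega) y
  | case3 h pos hc =>
    intro hp y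
    rw [siftupA, dif_neg hc]
    exact siftdownA_count h x pos hp y

theorem heap_root_min (h : List Int) (hh : IsHeap h) :
    ∀ c, c < h.length → hget h 0 ≤ hget h c := by
  intro c
  induction c using Nat.strong_induction_on with
  | _ c ih =>
    intro hclen
    rcases Nat.eq_zero_or_pos c with h0 | h1
    · subst h0; exact le_refl _
    · have hpc : par c < c := par_lt h1
      exact le_trans (ih (par c) hpc (by omega)) (hh c h1 hclen)

theorem heappushA_heap (h : List Int) (x : Int) (hh : IsHeap h) : IsHeap (heappushA h x) := by
  unfold heappushA
  apply siftdownA_heap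
  · simp
  · refine ⟨⟨?_, ?_⟩, ?_⟩
    · intro c hc hclen hcne hparne
      simp only [List.length_append, List.length_cons, List.length_nil] at hclen
      have hcl : c < h.length := by omega
      have hpcl : par c < h.length := by have := par_lt hc; omega
      rw [hget_append_left _ _ _ hpcl, hget_append_left _ _ _ hcl]
      exact hh c hc hcl
    · intro c hc hclen hparc hpos1
      exfalso
      simp only [List.length_append, List.length_cons, List.length_nil] at hclen
      unfold par at hparc; omega
    · intro c hc hclen hparc
      exfalso
      simp only [List.length_append, List.length_cons, List.length_nil] at hclen
      unfold par at hparc; omega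

theorem heappushA_count (h : List Int) (x : Int) (y : Int) :
    (heappushA h x).count y = h.count y + (if x = y then 1 else 0) := by
  unfold heappushA
  rw [siftdownA_count _ _ _ (by simp) y]
  have c1 := count_set (h ++ [x]) h.length (by simp) x y
  rw [hget_append_self h x] at c1
  have c2 : (h ++ [x]).count y = h.count y + (if x = y then 1 else 0) := by
    rw [List.count_append, count_singleton']
  split_ifs at c1 c2 ⊢ <;> omega

theorem heappopA_spec (h : List Int) (hh : IsHeap h) (hne : h ≠ []) :
    IsHeap (heappopA h).2 ∧ (heappopA h).1 = hget h 0 ∧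
      ∀ y, h.count y = (heappopA h).2.count y + (if (heappopA h).1 = y then 1 else 0) := by
  unfold heappopA
  have hlen1 : 1 ≤ h.length := by
    rcases h with _ | ⟨a, t⟩
    · exact absurd rfl hne
    · simp
  by_cases hre : h.dropLast.isEmpty
  · simp only [if_pos hre]
    obtain ⟨a, rfl⟩ : ∃ a, h = [a] := by
      rcases h with _ | ⟨a, _ | ⟨b, t⟩⟩
      · exact absurd rfl hne
      · exact ⟨a, rfl⟩
      · simp [List.dropLast] at hre
    refine ⟨?_, rfl, ?_⟩
    · intro c hc hl; simp at hl
    · intro y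
      simp [count_singleton', hget, List.dropLast]
  · have hrne : h.dropLast ≠ [] := by
      intro e; rw [e] at hre; simp at hre
    have hrlen : h.dropLast.length = h.length - 1 := List.length_dropLast
    have hpos0 : 0 < h.dropLast.length := List.length_pos_of_ne_nil hrne
    have hlen2 : 2 ≤ h.length := by omega
    simp only [if_neg hre]
    have hpos0' : 0 < (h.dropLast.set 0 (hget h (h.length - 1))).length := by
      rw [List.length_set]; omega
    have hinv : HoleInv (h.dropLast.set 0 (hget h (h.length - 1))) 0 := by
      constructor
      · intro c hc hclen hc0 hparc0
        rw [List.length_set] at hclen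
        have hpc : par c < c := par_lt hc
        rw [hget_set_ne _ _ _ _ (by omega), hget_set_ne _ _ _ _ (by omega)]
        rw [hget_dropLast _ _ (by omega), hget_dropLast _ _ (by omega)]
        exact hh c hc (by omega)
      · intro d hd hdlen hpard h10
        exact absurd h10 (by omega)
    refine ⟨siftupA_heap _ _ _ hpos0' hinv, hget_dropLast h 0 (by omega), ?_⟩
    intro y
    rw [siftupA_count _ _ _ hpos0' y, List.set_set]
    have c1 := count_set h.dropLast 0 hpos0 (hget h (h.length - 1)) y
    have hdec : h.dropLast ++ [hget h (h.length - 1)] = h := by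
      have e2 : h.getLast hne = hget h (h.length - 1) := by
        rw [List.getLast_eq_getElem, hget, List.getD_eq_getElem _ _ (by omega)]
      rw [← e2]
      exact List.dropLast_append_getLast hne
    have c2 : h.count y = h.dropLast.count y + (if hget h (h.length - 1) = y then 1 else 0) := by
      conv_lhs => rw [← hdec]
      rw [List.count_append, count_singleton']
    split_ifs at c1 c2 ⊢ <;> omega

theorem minIdx_fold : ∀ (js : List Nat) (ends : List Int) (best : Nat),
    best < ends.length → (∀ j ∈ js, j < ends.length) →
    (js.foldl (fun b j => if hget ends j < hget ends b then j else b) best) < ends.length ∧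
    hget ends (js.foldl (fun b j => if hget ends j < hget ends b then j else b) best) ≤ hget ends best ∧
    ∀ j ∈ js, hget ends (js.foldl (fun b j => if hget ends j < hget ends b then j else b) best) ≤ hget ends j
  | [], ends, best, hb, _ => ⟨hb, le_refl _, by simp⟩
  | j :: js, ends, best, hb, hall => by
      simp only [List.foldl_cons]
      by_cases hj : hget ends j < hget ends best
      · rw [if_pos hj]
        have ih := minIdx_fold js ends j (hall j (by simp)) (fun k hk => hall k (by simp [hk]))
        refine ⟨ih.1, le_trans ih.2.1 (le_of_lt hj), ?_⟩
        intro k hk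
        rcases List.mem_cons.mp hk with rfl | hk'
        · exact ih.2.1
        · exact ih.2.2 k hk'
      · rw [if_neg hj]
        have ih := minIdx_fold js ends best hb (fun k hk => hall k (by simp [hk]))
        refine ⟨ih.1, ih.2.1, ?_⟩
        intro k hk
        rcases List.mem_cons.mp hk with rfl | hk'
        · exact le_trans ih.2.1 (not_lt.mp hj)
        · exact ih.2.2 k hk'

theorem minIdx_spec (ends : List Int) (hne : ends ≠ []) :
    minIdx ends < ends.length ∧ ∀ j, j < ends.length → hget ends (minIdx ends) ≤ hget ends j := by
  have h0 : 0 < ends.length := List.length_pos_of_ne_nil hne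
  have hf := minIdx_fold (List.range ends.length) ends 0 h0 (fun j hj => List.mem_range.mp hj)
  unfold minIdx
  exact ⟨hf.1, fun j hj => hf.2.2 j (List.mem_range.mpr hj)⟩

theorem loop_agree (m : Int) (hm : 1 ≤ m) :
    ∀ (req : List (Int × Int)) (heap ends : List Int) (t : Int),
      IsHeap heap → heap.Perm ends →
      (req.foldl (calcStepA m) (heap, t)).2 = (req.foldl (calcStepB m) (ends, t)).2 := by
  intro req
  induction req with
  | nil => intro heap ends t _ _; rfl
  | cons ab req ih =>
    intro heap ends t hheap hperm
    have hlen : heap.length = ends.length := hperm.length_eq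
    rw [List.foldl_cons, List.foldl_cons]
    by_cases hbr : (heap.length : Int) < m
    · have hstepA : calcStepA m (heap, t) ab = (heappushA heap (ab.1 + ab.2), t) := by
        simp [calcStepA, hbr]
      have hstepB : calcStepB m (ends, t) ab = (ends ++ [ab.1 + ab.2], t) := by
        simp [calcStepB, ← hlen, hbr]
      rw [hstepA, hstepB]
      apply ih _ _ _ (heappushA_heap _ _ hheap)
      rw [List.perm_iff_count]
      intro y
      rw [heappushA_count, List.count_append, count_singleton', hperm.count_eq]
    · have hlen1 : 1 ≤ heap.length := by omega
      have hne : heap ≠ [] := by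
        intro e; rw [e] at hlen1; simp at hlen1
      have hneE : ends ≠ [] := by
        intro e; rw [e] at hlen; simp only [List.length_nil] at hlen; omega
      obtain ⟨hpopheap, hpop1, hpopcnt⟩ := heappopA_spec heap hheap hne
      obtain ⟨hmi, hmin⟩ := minIdx_spec ends hneE
      have key : hget ends (minIdx ends) = (heappopA heap).1 := by
        have h1 : (heappopA heap).1 ≤ hget ends (minIdx ends) := by
          have hmem : hget ends (minIdx ends) ∈ heap := (hperm.mem_iff).mpr (hget_mem ends _ hmi)
          obtain ⟨c, hc, hcv⟩ := mem_hget heap _ hmem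
          rw [hpop1, ← hcv]
          exact heap_root_min heap hheap c hc
        have h2 : hget ends (minIdx ends) ≤ (heappopA heap).1 := by
          have hmem : (heappopA heap).1 ∈ ends := by
            rw [hpop1]
            exact (hperm.mem_iff).mp (hget_mem heap 0 (by omega))
          obtain ⟨j, hj, hjv⟩ := mem_hget ends _ hmem
          rw [← hjv]
          exact hmin j hj
        exact le_antisymm h2 h1
      have hstepA : calcStepA m (heap, t) ab =
          (heappushA (heappopA heap).2 (max ab.1 (heappopA heap).1 + ab.2),
           t + (max ab.1 (heappopA heap).1 - ab.1)) := by
        simp [calcStepA, hbr]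
      have hstepB : calcStepB m (ends, t) ab =
          (ends.set (minIdx ends) (max ab.1 (hget ends (minIdx ends)) + ab.2),
           t + (max ab.1 (hget ends (minIdx ends)) - ab.1)) := by
        simp [calcStepB, ← hlen, hbr]
      rw [hstepA, hstepB, key]
      apply ih _ _ _ (heappushA_heap _ _ hpopheap)
      rw [List.perm_iff_count]
      intro y
      rw [heappushA_count]
      have c1 := count_set ends (minIdx ends) hmi (max ab.1 (heappopA heap).1 + ab.2) y
      rw [key] at c1
      have c2 := hpopcnt y
      have c3 : heap.count y = ends.count y := hperm.count_eq y
      split_ifs at c1 c2 ⊢ <;> omega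

-- ===== VERDICT (by name: the statement is the Claim_ definition above) =====
theorem calc_wait_spec : Claim_equal_calc_wait := by
  intro req m _hd hpre
  unfold Spec_calc_wait
  rcases req with _ | ⟨ab, req⟩
  · simp [calc_wait, calc_wait_alt]
  · rcases hpre with h | hm
    · exact absurd h (by simp)
    · simp only [calc_wait, calc_wait_alt, List.isEmpty_cons, Bool.false_eq_true, if_false]
      exact loop_agree m hm (ab :: req) [] [] 0 (by intro c hc hl; simp at hl) (List.Perm.refl _)
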